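-- pv_equiv track=rewrite | github.com/EIA485/ma3-lua-api-for-vscode | utils/generate_class_file/findTypes.py | _subseq_count_greedy
-- ===== SOURCE A (Python) =====
-- def _subseq_count_greedy(a: str, b: str) -> int:
--     j = 0
--     cnt = 0
--     for ch in b:
--         if j < len(a) and a[j] == ch:
--             j += 1
--             cnt += 1
--     return cnt
-- ===== SOURCE B (Python) =====
-- def _subseq_count_greedy(a: str, b: str) -> int:
--     it = iter(b)
--     cnt = 0
--     for ch in a:
--         if ch in it:
--             cnt += 1
--         else:
--             break
--     return cnt
-- ===== Notes on version B (the rewrite author's own statement) =====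
-- stated objective: idiomatic
-- what changed: B loops over the pattern a and lazily consumes a shared iterator over b with the 'ch in it' idiom (breaking on first miss), instead of A's loop over b maintaining an index j into a; the iterator scan of b runs inside the interpreter's C-level 'in' operator rather than a per-character Python loop.
import Mathlib
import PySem

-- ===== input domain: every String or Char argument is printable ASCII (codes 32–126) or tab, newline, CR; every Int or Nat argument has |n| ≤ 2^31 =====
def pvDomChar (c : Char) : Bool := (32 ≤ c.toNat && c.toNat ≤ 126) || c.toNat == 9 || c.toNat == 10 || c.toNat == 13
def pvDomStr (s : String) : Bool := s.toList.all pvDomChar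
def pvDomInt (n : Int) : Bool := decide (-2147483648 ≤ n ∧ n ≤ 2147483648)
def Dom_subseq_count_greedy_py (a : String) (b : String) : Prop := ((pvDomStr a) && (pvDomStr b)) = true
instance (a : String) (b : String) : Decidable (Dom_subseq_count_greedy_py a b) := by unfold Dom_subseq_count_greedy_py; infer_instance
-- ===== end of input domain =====

-- B re-decomposes the greedy prefix match: it iterates over the pattern `a` consuming `b` lazily,
-- instead of A's loop over `b` with an index into `a` (objective: idiomatic; same cost).


-- ===== PORT A =====
-- A's loop body: for ch in b: if j < len(a) and a[j] == ch: j += 1; cnt += 1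
def pvStepA (al : List Char) (st : Int × Int) (ch : Char) : Int × Int :=
  if st.1 < (al.length : Int) ∧ PySem.List.pyGet? al st.1 = some ch then (st.1 + 1, st.2 + 1) else st

def subseq_count_greedy_py (a : String) (b : String) : Int :=
  (b.toList.foldl (pvStepA a.toList) (0, 0)).2

-- ===== PORT B =====
-- `ch in it`: advance the iterator (remaining chars of b) until ch is found; none = exhausted
def pvConsume (ch : Char) : List Char → Option (List Char)
  | [] => none
  | x :: xs => if x = ch then some xs else pvConsume ch xs

-- for ch in a: if ch in it: cnt += 1 else: break
def pvGoB : List Char → List Char → Int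
  | [], _ => 0
  | ch :: rest, l =>
    match pvConsume ch l with
    | some l' => 1 + pvGoB rest l'
    | none => 0

def subseq_count_greedy_py_alt (a : String) (b : String) : Int :=
  pvGoB a.toList b.toList

-- ===== PRECONDITION & SPEC =====
def Spec_subseq_count_greedy_py (a : String) (b : String) (out : Int) : Prop := out = subseq_count_greedy_py_alt a b
instance (a : String) (b : String) (out : Int) : Decidable (Spec_subseq_count_greedy_py a b out) := by unfold Spec_subseq_count_greedy_py; infer_instance

-- ===== CLAIM (what is proved, stated in full; the proofs are below) =====
def Claim_equal_subseq_count_greedy_py : Prop := ∀ (a : String) (b : String), Dom_subseq_count_greedy_py a b → Spec_subseq_count_greedy_py a b (subseq_count_greedy_py a b)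

-- ===== LEMMAS AND PROOFS =====

theorem pvGoB_nil (al : List Char) : pvGoB al [] = 0 := by
  cases al <;> simp [pvGoB, pvConsume]

-- invariant of A's loop: from state (j, c) with j matched chars of a, the fold adds
-- exactly B's count on the remaining pattern (al.drop j)
theorem pvFoldA_eq (bl : List Char) : ∀ (al : List Char) (j : Nat) (c : Int),
    bl.foldl (pvStepA al) ((j : Int), c) = ((j : Int) + pvGoB (al.drop j) bl, c + pvGoB (al.drop j) bl) := by
  induction bl with
  | nil => intro al j c; simp [pvGoB_nil]
  | cons ch bl ih =>
    intro al j c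
    simp only [List.foldl_cons]
    by_cases hj : j < al.length
    · have hdrop : al.drop j = al[j] :: al.drop (j + 1) := List.drop_eq_getElem_cons hj
      have hget : PySem.List.pyGet? al (j : Int) = some al[j] := by
        simp [PySem.List.pyGet?_natCast, List.getElem?_eq_getElem hj]
      by_cases hc : al[j] = ch
      · have hcond : pvStepA al ((j : Int), c) ch = ((j : Int) + 1, c + 1) := by
          unfold pvStepA
          rw [if_pos ⟨show (j:Int) < al.length by exact_mod_cast hj, by rw [hget, hc]⟩]
        rw [hcond]
        have hcast : ((j : Int) + 1) = ((j + 1 : Nat) : Int) := by push_cast; ring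
        rw [hcast, ih al (j + 1) (c + 1)]
        rw [hdrop, hc]
        simp only [pvGoB, pvConsume, if_true, Prod.mk.injEq]
        constructor <;> push_cast <;> ring
      · have hcond : pvStepA al ((j : Int), c) ch = ((j : Int), c) := by
          unfold pvStepA
          rw [if_neg]
          rintro ⟨-, h⟩
          rw [hget] at h
          exact hc (Option.some.injEq _ _ ▸ h)
        rw [hcond, ih al j c, hdrop]
        have hne : ch ≠ al[j] := fun h => hc h.symm
        simp [pvGoB, pvConsume, hne]
    · have hcond : pvStepA al ((j : Int), c) ch = ((j : Int), c) := by
        unfold pvStepA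
        rw [if_neg]
        rintro ⟨h, -⟩
        omega
      rw [hcond, ih al j c]
      have hd : al.drop j = [] := List.drop_eq_nil_of_le (by omega)
      simp [hd, pvGoB]

-- ===== VERDICT (by name: the statement is the Claim_ definition above) =====
theorem subseq_count_greedy_py_spec : Claim_equal_subseq_count_greedy_py := by
  intro a b _
  show _ = _
  unfold subseq_count_greedy_py subseq_count_greedy_py_alt
  have := pvFoldA_eq b.toList a.toList 0 0
  simp only [Nat.cast_zero] at this
  rw [this]
  simp
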